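-- pv_equiv track=rewrite | github.com/samLeheny/Snowman3 | rigger/rig_factory/utilities/node_utilities/name_utilities.py | create_alpha_dictionary
-- ===== SOURCE A (Python) =====
-- import itertools
--
-- def create_alpha_dictionary(depth=4):
--     ad = {}
--     mit = 0
--     for its in range(1, depth):
--         for combo in itertools.product('abcdefghijklmnopqrstuvwxyz', repeat=its):
--             ad[mit] = ''.join(combo)
--             mit += 1
--     return ad
-- ===== SOURCE B (Python) =====
-- def create_alpha_dictionary(depth=4):
--     # Closed-form count plus direct bijective base-26 decoding of each index
--     # (Excel-column style): no enumeration of products or levels at all.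
--     total = (26 ** depth - 26) // 25 if depth > 1 else 0
--     ad = {}
--     for i in range(total):
--         n = i + 1
--         s = ''
--         while n:
--             n -= 1
--             s = chr(97 + n % 26) + s
--             n //= 26
--         ad[i] = s
--     return ad
-- ===== Notes on version B (the rewrite author's own statement) =====
-- stated objective: alternative
-- what changed: B never enumerates combinations: it computes the total count in closed form ((26^depth-26)/25) and decodes each integer index directly into its string by bijective base-26 (Excel-column) arithmetic, instead of iterating itertools.product per length.
import Mathlib
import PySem

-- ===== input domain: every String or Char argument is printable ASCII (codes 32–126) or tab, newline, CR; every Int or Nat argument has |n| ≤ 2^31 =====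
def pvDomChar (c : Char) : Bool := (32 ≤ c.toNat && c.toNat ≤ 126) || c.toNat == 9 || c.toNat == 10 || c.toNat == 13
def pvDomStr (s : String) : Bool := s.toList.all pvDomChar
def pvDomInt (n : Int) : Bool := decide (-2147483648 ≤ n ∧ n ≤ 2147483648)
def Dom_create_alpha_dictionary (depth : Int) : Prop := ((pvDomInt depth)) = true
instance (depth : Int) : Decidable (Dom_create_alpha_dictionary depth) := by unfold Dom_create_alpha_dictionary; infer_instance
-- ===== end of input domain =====

-- B replaces per-length product enumeration by a closed-form total count plus
-- direct bijective base-26 decoding of each integer index; same returned dict.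


-- ===== PORT A =====
def pvAlphabet : List Char :=
  ['a','b','c','d','e','f','g','h','i','j','k','l','m',
   'n','o','p','q','r','s','t','u','v','w','x','y','z']

-- itertools.product('abc…z', repeat=n): all n-tuples, leftmost coordinate slowest
def pvProduct : Nat → List (List Char)
  | 0 => [[]]
  | n+1 => pvAlphabet.flatMap (fun c => (pvProduct n).map (fun t => c :: t))

def create_alpha_dictionary (depth : Int) : List (Int × String) :=
  ((PySem.List.pyRange 1 depth 1).foldl
    (fun (st : PySem.Dict Int String × Int) its =>
      (pvProduct its.toNat).foldl
        (fun (st : PySem.Dict Int String × Int) combo =>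
          (st.1.insert st.2 (String.ofList combo), st.2 + 1)) st)   -- ''.join(combo)
    (PySem.Dict.empty, 0)).1.items

-- ===== PORT B =====
-- the 'while n:' loop of Source B; n stays ≥ 0 so it is carried as a Nat
-- (Python's // and % on nonnegative ints coincide with Nat division/mod)
def pvDecLoop (n : Nat) (s : List Char) : List Char :=
  if n = 0 then s
  else pvDecLoop ((n - 1) / 26) (Char.ofNat (97 + (n - 1) % 26) :: s)
  termination_by n
  decreasing_by exact Nat.lt_of_le_of_lt (Nat.div_le_self _ _) (by omega)

def create_alpha_dictionary_alt (depth : Int) : List (Int × String) :=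
  let total : Int :=
    if depth > 1 then PySem.Int.floordiv ((26:Int) ^ depth.toNat - 26) 25 else 0
  ((PySem.List.pyRange 0 total 1).foldl
    (fun (d : PySem.Dict Int String) i =>
      d.insert i (String.ofList (pvDecLoop (i + 1).toNat [])))
    PySem.Dict.empty).items

-- ===== PRECONDITION & SPEC =====
def Spec_create_alpha_dictionary (depth : Int) (out : List (Int × String)) : Prop := out = create_alpha_dictionary_alt depth
instance (depth : Int) (out : List (Int × String)) : Decidable (Spec_create_alpha_dictionary depth out) := by unfold Spec_create_alpha_dictionary; infer_instance

-- ===== CLAIM (what is proved, stated in full; the proofs are below) =====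
def Claim_equal_create_alpha_dictionary : Prop := ∀ (depth : Int), Dom_create_alpha_dictionary depth → Spec_create_alpha_dictionary depth (create_alpha_dictionary depth)

-- ===== LEMMAS AND PROOFS =====

-- the while loop without its accumulator: the bijective base-26 digits of n
def pvDec (n : Nat) : List Char :=
  if n = 0 then []
  else pvDec ((n - 1) / 26) ++ [Char.ofNat (97 + (n - 1) % 26)]
  termination_by n
  decreasing_by exact Nat.lt_of_le_of_lt (Nat.div_le_self _ _) (by omega)

theorem pvDecLoop_eq (n : Nat) : ∀ s, pvDecLoop n s = pvDec n ++ s := by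
  induction n using Nat.strong_induction_on with
  | _ n ih =>
    intro s
    rw [pvDecLoop, pvDec]
    by_cases h : n = 0
    · simp [h]
    · rw [if_neg h, if_neg h, ih _ (Nat.lt_of_le_of_lt (Nat.div_le_self _ _) (by omega))]
      simp

theorem pvDec_succ (m : Nat) :
    pvDec (m + 1) = pvDec (m / 26) ++ [Char.ofNat (97 + m % 26)] := by
  rw [pvDec]; simp

-- pvC k = 26 + 26^2 + … + 26^k, the number of strings of length ≤ k
def pvC : Nat → Nat
  | 0 => 0
  | k+1 => 26 * (pvC k + 1)

theorem pvC_closed (m : Nat) : 25 * pvC m + 26 = 26 ^ (m + 1) := by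
  induction m with
  | zero => simp [pvC]
  | succ m ih =>
    rw [pow_succ, ← ih, show pvC (m+1) = 26 * (pvC m + 1) from rfl]
    ring

theorem pv_range_mul (a b : Nat) :
    List.range (a * b) =
      (List.range a).flatMap (fun q => (List.range b).map (fun r => b * q + r)) := by
  induction a with
  | zero => simp
  | succ a ih =>
    rw [List.range_succ, List.flatMap_append, ← ih, Nat.succ_mul, List.range_add]
    simp [Nat.mul_comm]

-- the prepend-built product, re-expressed as appending a last letter
theorem pvProduct_snoc (n : Nat) :
    pvProduct (n+1) = (pvProduct n).flatMap (fun t => pvAlphabet.map (fun c => t ++ [c])) := by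
  induction n with
  | zero => decide
  | succ n ih =>
      show pvAlphabet.flatMap (fun c => (pvProduct (n+1)).map (fun t => c :: t))
         = (pvAlphabet.flatMap (fun c => (pvProduct n).map (fun t => c :: t))).flatMap
             (fun t => pvAlphabet.map (fun c => t ++ [c]))
      conv_lhs => rw [ih]
      simp [List.map_flatMap, List.flatMap_map, List.flatMap_assoc, List.map_map,
        Function.comp_def]

-- MAIN: the products of length k+1, in order, are pvDec of consecutive indices
theorem pvProduct_dec (k : Nat) :
    pvProduct (k+1) = (List.range (26 ^ (k+1))).map (fun p => pvDec (pvC k + p + 1)) := by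
  induction k with
  | zero =>
    have h : ∀ p ∈ List.range 26, pvDec (pvC 0 + p + 1) = [Char.ofNat (97 + p)] := by
      intro p hp
      rw [show pvC 0 + p + 1 = p + 1 by simp [pvC], pvDec_succ,
        Nat.div_eq_of_lt (List.mem_range.1 hp), Nat.mod_eq_of_lt (List.mem_range.1 hp)]
      rw [pvDec]; simp
    rw [show (26 ^ 1) = 26 from rfl, List.map_congr_left h]
    decide
  | succ k ih =>
    have halpha : pvAlphabet = (List.range 26).map (fun r => Char.ofNat (97 + r)) := by decide
    rw [pvProduct_snoc, ih,
      show 26 ^ (k+1+1) = 26 ^ (k+1) * 26 from pow_succ 26 (k+1), pv_range_mul,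
      List.flatMap_map, List.map_flatMap]
    refine List.flatMap_congr (fun q _ => ?_)
    rw [halpha, List.map_map, List.map_map]
    refine List.map_congr_left (fun r hr => ?_)
    have hr26 : r < 26 := List.mem_range.1 hr
    have hm : pvC (k+1) + (26 * q + r) + 1 = (pvC (k+1) + 26 * q + r) + 1 := by ring
    have hstep := pvDec_succ (pvC (k+1) + 26 * q + r)
    have hdiv : (pvC (k+1) + 26 * q + r) / 26 = pvC k + q + 1 := by
      rw [show pvC (k+1) = 26 * (pvC k + 1) from rfl]; omega
    have hmod : (pvC (k+1) + 26 * q + r) % 26 = r := by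
      rw [show pvC (k+1) = 26 * (pvC k + 1) from rfl]; omega
    simp only [Function.comp_def, hm, hstep, hdiv, hmod]

-- the full emission sequence of A (lengths 1..m)
def pvElist (m : Nat) : List (List Char) := (List.range m).flatMap (fun k => pvProduct (k+1))

theorem pvElist_succ (m : Nat) : pvElist (m+1) = pvElist m ++ pvProduct (m+1) := by
  rw [pvElist, List.range_succ, List.flatMap_append]
  simp [pvElist]

theorem pvElist_dec (m : Nat) :
    pvElist m = (List.range (pvC m)).map (fun i => pvDec (i + 1)) := by
  induction m with
  | zero => simp [pvElist, pvC]
  | succ m ih =>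
    have hC : pvC (m+1) = pvC m + 26 ^ (m+1) := by
      have := pvC_closed m
      rw [show pvC (m+1) = 26 * (pvC m + 1) from rfl]; omega
    rw [pvElist_succ, ih, hC, List.range_add, List.map_append]
    congr 1
    rw [pvProduct_dec, List.map_map]
    exact List.map_congr_left (fun p _ => by simp [Nat.add_assoc])

-- the shared emission loop (A's inner dict-filling fold)
def pvEmit (st : PySem.Dict Int String × Int) (ss : List String) : PySem.Dict Int String × Int :=
  ss.foldl (fun p s => (p.1.insert p.2 s, p.2 + 1)) st

theorem pvEmit_append (st : PySem.Dict Int String × Int) (a b : List String) :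
    pvEmit st (a ++ b) = pvEmit (pvEmit st a) b := by
  simp [pvEmit]

theorem pvEmit_snd (ss : List String) : ∀ (d : PySem.Dict Int String) (c : Int),
    (pvEmit (d, c) ss).2 = c + ss.length := by
  induction ss with
  | nil => intro d c; simp [pvEmit]
  | cons s ss ih =>
    intro d c
    show (pvEmit (d.insert c s, c + 1) ss).2 = c + (ss.length + 1)
    rw [ih]; omega

-- A's outer loop produces exactly the emission of pvElist
theorem pvA_fold (m : Nat) (st : PySem.Dict Int String × Int) :
    ((List.range m).map (fun k : Nat => (1:Int) + k)).foldl
      (fun (st : PySem.Dict Int String × Int) its =>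
        (pvProduct its.toNat).foldl
          (fun (st : PySem.Dict Int String × Int) combo =>
            (st.1.insert st.2 (String.ofList combo), st.2 + 1)) st) st
    = pvEmit st ((pvElist m).map String.ofList) := by
  induction m generalizing st with
  | zero => simp [pvElist, pvEmit]
  | succ m ih =>
    rw [List.range_succ, List.map_append, List.foldl_append, ih]
    have ht : ((1:Int) + (m:Int)).toNat = m + 1 := by omega
    simp only [List.map_cons, List.map_nil, List.foldl_cons, List.foldl_nil, ht]
    rw [pvElist_succ, List.map_append, pvEmit_append]
    simp only [pvEmit, List.foldl_map]

-- B's loop keyed by the range index equals the counter-based emission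
theorem pvB_fold (t : Nat) : ∀ (d : PySem.Dict Int String) (c : Nat),
    ((List.range t).map (fun k : Nat => ((c:Int) + k))).foldl
      (fun (d : PySem.Dict Int String) i =>
        d.insert i (String.ofList (pvDecLoop (i + 1).toNat []))) d
    = (pvEmit (d, (c:Int)) ((List.range t).map (fun k => String.ofList (pvDec (c + k + 1))))).1 := by
  induction t with
  | zero => intro d c; simp [pvEmit]
  | succ t ih =>
    intro d c
    rw [List.range_succ, List.map_append, List.foldl_append, ih, List.map_append,
      pvEmit_append]
    have hsnd : (pvEmit (d, (c:Int)) ((List.range t).map (fun k => String.ofList (pvDec (c + k + 1))))).2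
        = (c:Int) + t := by
      rw [pvEmit_snd]; simp
    have htn : (((c:Int) + (t:Int)) + 1).toNat = c + t + 1 := by omega
    simp only [List.map_cons, List.map_nil, List.foldl_cons, List.foldl_nil]
    show _ = ((pvEmit _ _).1.insert (pvEmit _ _).2 (String.ofList (pvDec (c + t + 1))), _).1
    rw [hsnd, htn, pvDecLoop_eq]
    simp

-- ===== VERDICT (by name: the statement is the Claim_ definition above) =====
theorem create_alpha_dictionary_spec : Claim_equal_create_alpha_dictionary := by
  intro depth _
  show create_alpha_dictionary depth = create_alpha_dictionary_alt depth
  unfold create_alpha_dictionary create_alpha_dictionary_alt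
  dsimp only
  by_cases hd : depth > 1
  · -- total = pvC m with m = (depth - 1).toNat
    have hdt : depth.toNat = (depth - 1).toNat + 1 := by omega
    set m : Nat := (depth - 1).toNat with hm
    have htotal : (if depth > 1 then PySem.Int.floordiv ((26:Int) ^ depth.toNat - 26) 25 else 0)
        = (pvC m : Int) := by
      rw [if_pos hd, hdt]
      have h26 : ((26:Int) ^ (m + 1) - 26) = 25 * (pvC m : Int) := by
        have hn : ((26:Int) ^ (m + 1)) = 25 * (pvC m : Int) + 26 := by
          exact_mod_cast (pvC_closed m).symm
        rw [hn]; ring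
      rw [h26, PySem.Int.floordiv_eq_ediv_of_pos (by norm_num),
        Int.mul_ediv_cancel_left _ (by norm_num)]
    simp only [htotal]
    rw [PySem.List.pyRange_one 1 depth, PySem.List.pyRange_one 0 (pvC m : Int)]
    have h1 : (depth - 1).toNat = m := rfl
    rw [h1, pvA_fold]
    have h2 : (((pvC m : Int)) - 0).toNat = pvC m := by omega
    rw [h2]
    have h3 : (fun k : Nat => (0:Int) + k) = (fun k : Nat => (((0:Nat):Int) + k)) := by
      funext k; simp
    rw [h3, pvB_fold (pvC m) PySem.Dict.empty 0]
    rw [pvElist_dec, List.map_map]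
    simp [Function.comp_def]
  · -- depth ≤ 1: both ranges are empty, both dicts empty
    rw [if_neg hd]
    rw [PySem.List.pyRange_one_eq_nil (by omega), PySem.List.pyRange_one_eq_nil (by omega)]
    rfl
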